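-- pv_equiv track=rewrite | github.com/QuitoTactico/PYTHON | Basics UNAL-NACHO/Basics_3/a3_2.py | f
-- ===== SOURCE A (Python) =====
-- def f(n, m):
--     s = [
--         2,
--         1,
--         3,
--         4,
--         7,
--         11,
--         18,
--         29,
--         47,
--         76,
--         123,
--         199,
--         322,
--         521,
--         843,
--         1364,
--         2207,
--         3571,
--         5778,
--         9349,
--         15127,
--         24476,
--         39603,
--         64079,
--         103682,
--         167761,
--         271443,
--         439204,
--         710647,
--         1149851,
--         1860498,
--         3010349,
--         4870847,
--         7881196,
--         12752043,
--     ]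
--     # for k in range(1,36): s.append(l(k))
--     c = 0
--     for i in range(n, m + 1):
--         if i in s:
--             c += 1
--     return c
-- ===== SOURCE B (Python) =====
-- def f(n, m):
--     # generate the 35 Lucas numbers by the recurrence instead of scanning [n, m]
--     a, b = 2, 1
--     c = 0
--     for _ in range(35):
--         if n <= a <= m:
--             c += 1
--         a, b = b, a + b
--     return c
-- ===== Notes on version B (the rewrite author's own statement) =====
-- stated objective: faster
-- what changed: Instead of scanning every integer i in [n,m] and testing membership in a 35-element literal list, B generates the 35 Lucas numbers by the recurrence a,b = b,a+b and counts those lying in [n,m].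
import Mathlib
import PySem

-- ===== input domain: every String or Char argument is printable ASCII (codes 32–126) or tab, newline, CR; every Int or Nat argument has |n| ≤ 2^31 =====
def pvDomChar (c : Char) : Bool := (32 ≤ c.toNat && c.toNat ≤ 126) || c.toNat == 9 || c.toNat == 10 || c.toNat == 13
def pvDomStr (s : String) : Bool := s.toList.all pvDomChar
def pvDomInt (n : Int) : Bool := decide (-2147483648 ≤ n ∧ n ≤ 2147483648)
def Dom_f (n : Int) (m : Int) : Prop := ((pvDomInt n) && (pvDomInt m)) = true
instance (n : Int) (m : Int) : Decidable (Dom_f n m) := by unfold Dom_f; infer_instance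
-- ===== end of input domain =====

-- B generates the 35 Lucas numbers by the recurrence a,b = b,a+b and counts those in
-- [n, m], instead of A's scan of every integer of [n, m] with a list membership test.

-- ===== PORT A =====
-- the literal list s of A
def pvSA : List Int :=
  [2, 1, 3, 4, 7, 11, 18, 29, 47, 76, 123, 199, 322, 521, 843, 1364,
   2207, 3571, 5778, 9349, 15127, 24476, 39603, 64079, 103682, 167761,
   271443, 439204, 710647, 1149851, 1860498, 3010349, 4870847, 7881196,
   12752043]

def f (n : Int) (m : Int) : Int :=
  (PySem.List.pyRange n (m + 1) 1).foldl
    (fun c i => if i ∈ pvSA then c + 1 else c) 0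

-- ===== PORT B =====
-- state is ((a, b), c); each of the 35 iterations tests a and steps the recurrence
def f_alt (n : Int) (m : Int) : Int :=
  ((List.range 35).foldl
    (fun s _ => ((s.1.2, s.1.1 + s.1.2), if n ≤ s.1.1 ∧ s.1.1 ≤ m then s.2 + 1 else s.2))
    ((2, 1), 0)).2

-- ===== PRECONDITION & SPEC =====
def Spec_f (n : Int) (m : Int) (out : Int) : Prop := out = f_alt n m
instance (n : Int) (m : Int) (out : Int) : Decidable (Spec_f n m out) := by unfold Spec_f; infer_instance

-- ===== CLAIM (what is proved, stated in full; the proofs are below) =====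
def Claim_equal_f : Prop := ∀ (n : Int) (m : Int), Dom_f n m → Spec_f n m (f n m)

-- ===== LEMMAS AND PROOFS =====

-- a counting foldl is a countP
theorem pvFoldl_count {α : Type} (p : α → Prop) [DecidablePred p]
    (l : List α) (c : Int) :
    l.foldl (fun c x => if p x then c + 1 else c) c = c + l.countP (fun x => decide (p x)) := by
  induction l generalizing c with
  | nil => simp
  | cons a t ih =>
    simp only [List.foldl_cons, List.countP_cons, ih]
    by_cases h : p a
    · simp only [h, if_pos, decide_true]
      push_cast
      omega
    · simp [h]

-- a foldl whose step ignores the element is an iterate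
theorem pvFoldl_const {α β : Type} (g : α → α) :
    ∀ (l : List β) (i : α), l.foldl (fun s _ => g s) i = g^[l.length] i := by
  intro l
  induction l with
  | nil => intro i; simp
  | cons a t ih =>
    intro i
    simp [List.foldl_cons, ih, Function.iterate_succ_apply]

-- the list of Lucas values the recurrence visits, starting from (a, b)
def pvLucasFrom (a b : Int) : Nat → List Int
  | 0 => []
  | k + 1 => a :: pvLucasFrom b (a + b) k

theorem pvIter_lucas (n m : Int) :
    ∀ (k : Nat) (a b c : Int),
      (((fun s : (Int × Int) × Int =>
          ((s.1.2, s.1.1 + s.1.2), if n ≤ s.1.1 ∧ s.1.1 ≤ m then s.2 + 1 else s.2))^[k])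
        ((a, b), c)).2
      = c + ((pvLucasFrom a b k).countP (fun x => decide (n ≤ x ∧ x ≤ m)) : Int) := by
  intro k
  induction k with
  | zero => intro a b c; simp [pvLucasFrom]
  | succ k ih =>
    intro a b c
    rw [Function.iterate_succ_apply]
    simp only [ih, pvLucasFrom, List.countP_cons]
    by_cases h : n ≤ a ∧ a ≤ m
    · rw [if_pos h]
      simp only [h.1, h.2, and_self, decide_true, if_true]
      push_cast
      omega
    · simp [h]

theorem pvNodupS : pvSA.Nodup := by decide

-- both filtered lists are nodup with the same membership, hence the same count
theorem pvCount_swap (n m : Int) :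
    (PySem.List.pyRange n (m + 1) 1).countP (fun i => decide (i ∈ pvSA))
      = pvSA.countP (fun x => decide (n ≤ x ∧ x ≤ m)) := by
  rw [List.countP_eq_length_filter, List.countP_eq_length_filter]
  have h1 : ((PySem.List.pyRange n (m + 1) 1).filter (fun i => decide (i ∈ pvSA))).Nodup :=
    (PySem.List.nodup_pyRange_one n (m + 1)).filter _
  have h2 : (pvSA.filter (fun x => decide (n ≤ x ∧ x ≤ m))).Nodup :=
    pvNodupS.filter _
  rw [← List.toFinset_card_of_nodup h1, ← List.toFinset_card_of_nodup h2]
  congr 1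
  apply Finset.ext
  intro x
  simp only [List.mem_toFinset, List.mem_filter, PySem.List.mem_pyRange_one,
    decide_eq_true_eq]
  constructor
  · rintro ⟨⟨h1, h2⟩, h3⟩
    exact ⟨h3, h1, by omega⟩
  · rintro ⟨h1, h2, h3⟩
    exact ⟨⟨h2, by omega⟩, h1⟩

theorem pvLucasFrom_eq : pvLucasFrom 2 1 35 = pvSA := by decide

-- ===== VERDICT (by name: the statement is the Claim_ definition above) =====
theorem f_spec : Claim_equal_f := by
  intro n m _
  unfold Spec_f f f_alt
  rw [pvFoldl_count (fun i => i ∈ pvSA), pvFoldl_const]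
  rw [pvIter_lucas]
  simp only [List.length_range, pvLucasFrom_eq]
  rw [pvCount_swap]
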